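-- pv_equiv track=rewrite | github.com/kirill5pol/bt | generate.py | concepts
-- ===== SOURCE A (Python) =====
-- def concepts(n):
--     """Create `n` concepts where each is named with a letter or series of letters
--     ie A, B, ..., Z, AA, AB, ...
--
--     Return concepts: a dictionary that maps the concept number to it's name
--     ie. {0:'A', ..., 25:'Z', 26:'AA', 27:'AB', ...}
--     """
--
--     def letters(n):
--         if n < 26:
--             return chr(ord("A") + n)  # Get the letter
--         else:
--             return letters(int(n / 26) - 1) + chr(ord("A") + n % 26)  # Get the letters
--
--     concepts = {}
--     concepts_inv = {}
--     i = 0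
--     while i < n:
--         concept_name = letters(i)
--         concepts[i] = concept_name
--         concepts_inv[concept_name] = i
--         i += 1
--
--     return concepts, concepts_inv
-- ===== SOURCE B (Python) =====
-- def _inc(digits):
--     """Increment a base-26 'odometer' stored least-significant digit first."""
--     if not digits:
--         return [0]
--     if digits[0] == 25:
--         return [0] + _inc(digits[1:])
--     return [digits[0] + 1] + digits[1:]
--
--
-- def concepts(n):
--     """Create `n` concepts named A, B, ..., Z, AA, AB, ... by counting with an
--     odometer of base-26 digits instead of converting each index from scratch."""
--     fwd = {}
--     inv = {}
--     digits = []  # least-significant digit first; name of i-1 (empty before start)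
--     i = 0
--     while i < n:
--         digits = _inc(digits)
--         name = "".join(chr(ord("A") + d) for d in reversed(digits))
--         fwd[i] = name
--         inv[name] = i
--         i += 1
--     return fwd, inv
-- ===== Notes on version B (the rewrite author's own statement) =====
-- stated objective: alternative
-- what changed: Instead of recomputing each name from its index with A's recursive base-26 conversion, B counts: it keeps the current name as a little-endian digit list and increments it with a carry (odometer) on every iteration, so no per-index division happens at all.
import Mathlib
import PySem

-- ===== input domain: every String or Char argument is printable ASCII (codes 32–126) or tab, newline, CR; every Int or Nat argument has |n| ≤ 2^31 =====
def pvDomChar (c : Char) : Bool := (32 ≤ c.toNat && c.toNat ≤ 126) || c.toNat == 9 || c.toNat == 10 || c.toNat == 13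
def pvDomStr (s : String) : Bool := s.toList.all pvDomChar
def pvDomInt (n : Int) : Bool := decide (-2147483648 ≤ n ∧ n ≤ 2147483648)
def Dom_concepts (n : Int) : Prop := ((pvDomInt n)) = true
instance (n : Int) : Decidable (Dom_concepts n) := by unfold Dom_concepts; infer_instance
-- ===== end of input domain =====

-- B replaces A's per-index recursive base-26 conversion by an incrementing odometer of digits.

-- ===== PORT A =====
-- letters(n): recursive helper; the loop only calls it with 0 ≤ n, where Python's
-- int(n / 26) (float division, |n| ≤ 2^31 ≪ 2^53) equals n // 26 = PySem.Int.floordiv n 26.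
-- Strings are built on List Char and wrapped with String.ofList (kernel-transparent append).
def lettersAChars (n : Int) : List Char :=
  if n < 26 then [Char.ofNat (65 + n.toNat)]
  else lettersAChars (PySem.Int.floordiv n 26 - 1) ++ [Char.ofNat (65 + (PySem.Int.mod n 26).toNat)]
termination_by n.toNat
decreasing_by
  rename_i h
  have : PySem.Int.floordiv n 26 = n / 26 := PySem.Int.floordiv_eq_ediv_of_pos (by omega)
  rw [this]; omega

def concepts (n : Int) : (List (Int × String)) × (List (String × Int)) :=
  let st := (PySem.List.pyRange 0 n 1).foldl
    (fun (st : PySem.Dict Int String × PySem.Dict String Int) i =>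
      let name := String.ofList (lettersAChars i)
      (st.1.insert i name, st.2.insert name i))
    (PySem.Dict.empty, PySem.Dict.empty)
  (st.1.items, st.2.items)

-- ===== PORT B =====
-- _inc: structural recursion on the digit list, exactly Source B's _inc.
def incB : List Int → List Int
  | [] => [0]
  | d :: ds => if d == 25 then 0 :: incB ds else (d + 1) :: ds

def concepts_alt (n : Int) : (List (Int × String)) × (List (String × Int)) :=
  let st := (PySem.List.pyRange 0 n 1).foldl
    (fun (st : (PySem.Dict Int String × PySem.Dict String Int) × List Int) i =>
      let digits := incB st.2
      let name := String.ofList (digits.reverse.map (fun d => Char.ofNat (65 + d.toNat)))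
      ((st.1.1.insert i name, st.1.2.insert name i), digits))
    ((PySem.Dict.empty, PySem.Dict.empty), [])
  (st.1.1.items, st.1.2.items)

-- ===== PRECONDITION & SPEC =====
def Spec_concepts (n : Int) (out : (List (Int × String)) × (List (String × Int))) : Prop := out = concepts_alt n
instance (n : Int) (out : (List (Int × String)) × (List (String × Int))) : Decidable (Spec_concepts n out) := by unfold Spec_concepts; infer_instance

-- ===== CLAIM (what is proved, stated in full; the proofs are below) =====
def Claim_equal_concepts : Prop := ∀ (n : Int), Dom_concepts n → Spec_concepts n (concepts n)

-- ===== LEMMAS AND PROOFS =====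

-- Digits of A's name for i, least-significant first (proof-side mirror of lettersAChars).
def revDigits (i : Int) : List Int :=
  if i < 26 then [i]
  else PySem.Int.mod i 26 :: revDigits (PySem.Int.floordiv i 26 - 1)
termination_by i.toNat
decreasing_by
  rename_i h
  have : PySem.Int.floordiv i 26 = i / 26 := PySem.Int.floordiv_eq_ediv_of_pos (by omega)
  rw [this]; omega

theorem lettersAChars_eq_revDigits (k : Nat) : ∀ i : Int, i.toNat = k → 0 ≤ i →
    lettersAChars i = (revDigits i).reverse.map (fun d => Char.ofNat (65 + d.toNat)) := by
  induction k using Nat.strong_induction_on with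
  | _ k ih =>
    intro i hk hi
    rw [lettersAChars, revDigits]
    by_cases h26 : i < 26
    · simp [h26]
    · have hfd : PySem.Int.floordiv i 26 = i / 26 :=
        PySem.Int.floordiv_eq_ediv_of_pos (by omega)
      have hlt : (PySem.Int.floordiv i 26 - 1).toNat < k := by rw [hfd]; omega
      have hnn : 0 ≤ PySem.Int.floordiv i 26 - 1 := by rw [hfd]; omega
      rw [if_neg h26, if_neg h26, ih _ hlt _ rfl hnn]
      simp

-- Odometer step: incrementing the digits of i yields the digits of i + 1.
theorem incB_revDigits (k : Nat) : ∀ i : Int, i.toNat = k → 0 ≤ i →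
    incB (revDigits i) = revDigits (i + 1) := by
  induction k using Nat.strong_induction_on with
  | _ k ih =>
    intro i hk hi
    rw [revDigits]
    by_cases h26 : i < 26
    · rw [if_pos h26, incB]
      by_cases h25 : i = 25
      · subst h25
        have h0 : revDigits 0 = [0] := by rw [revDigits]; norm_num
        have h2 : revDigits (25 + 1) = [0, 0] := by
          rw [revDigits, if_neg (by norm_num)]
          norm_num [PySem.Int.mod_eq_emod_of_pos, PySem.Int.floordiv_eq_ediv_of_pos, h0]
        rw [h2]; simp [incB]
      · rw [if_neg (by simpa using h25), revDigits, if_pos (by omega)]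
    · have hfd : PySem.Int.floordiv i 26 = i / 26 :=
        PySem.Int.floordiv_eq_ediv_of_pos (by omega)
      have hmod : PySem.Int.mod i 26 = i % 26 :=
        PySem.Int.mod_eq_emod_of_pos (by omega)
      have hfd1 : PySem.Int.floordiv (i + 1) 26 = (i + 1) / 26 :=
        PySem.Int.floordiv_eq_ediv_of_pos (by omega)
      have hmod1 : PySem.Int.mod (i + 1) 26 = (i + 1) % 26 :=
        PySem.Int.mod_eq_emod_of_pos (by omega)
      rw [if_neg h26, incB]
      by_cases h25 : i % 26 = 25
      · have hlt : (PySem.Int.floordiv i 26 - 1).toNat < k := by rw [hfd]; omega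
        have hnn : 0 ≤ PySem.Int.floordiv i 26 - 1 := by rw [hfd]; omega
        rw [if_pos (by simp [h25]), ih _ hlt _ rfl hnn]
        conv_rhs => rw [revDigits, if_neg (by omega)]
        have e1 : PySem.Int.mod (i + 1) 26 = 0 := by rw [hmod1]; omega
        have e2 : PySem.Int.floordiv (i + 1) 26 - 1 = PySem.Int.floordiv i 26 - 1 + 1 := by
          rw [hfd, hfd1]; omega
        rw [e1, e2]
      · rw [if_neg (by simp [h25])]
        conv_rhs => rw [revDigits, if_neg (by omega)]
        have e1 : PySem.Int.mod (i + 1) 26 = PySem.Int.mod i 26 + 1 := by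
          rw [hmod, hmod1]; omega
        have e2 : PySem.Int.floordiv (i + 1) 26 - 1 = PySem.Int.floordiv i 26 - 1 := by
          rw [hfd, hfd1]; omega
        rw [e1, e2]

-- One step of each fold.
def stepA (st : PySem.Dict Int String × PySem.Dict String Int) (i : Int) :
    PySem.Dict Int String × PySem.Dict String Int :=
  let name := String.ofList (lettersAChars i)
  (st.1.insert i name, st.2.insert name i)

def stepB (st : (PySem.Dict Int String × PySem.Dict String Int) × List Int) (i : Int) :
    (PySem.Dict Int String × PySem.Dict String Int) × List Int :=
  let digits := incB st.2
  let name := String.ofList (digits.reverse.map (fun d => Char.ofNat (65 + d.toNat)))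
  ((st.1.1.insert i name, st.1.2.insert name i), digits)

-- Simulation: over consecutive integers, B's fold carries the digits of the
-- previous index and its dict pair tracks A's fold.
theorem sim (k : Nat) : ∀ (i n : Int), (n - i).toNat = k → 0 ≤ i →
    ∀ (st : PySem.Dict Int String × PySem.Dict String Int) (ds : List Int),
    incB ds = revDigits i →
    ((PySem.List.pyRange i n 1).foldl stepB (st, ds)).1 =
      (PySem.List.pyRange i n 1).foldl stepA st := by
  induction k using Nat.strong_induction_on with
  | _ k ih =>
    intro i n hk hi st ds hds
    by_cases hlt : i < n
    · rw [PySem.List.pyRange_one_cons hlt]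
      simp only [List.foldl_cons]
      have hname : stepB (st, ds) i =
          ((stepA st i), revDigits i) := by
        simp only [stepB, stepA, hds,
          lettersAChars_eq_revDigits i.toNat i rfl hi]
      rw [hname]
      exact ih (n - (i + 1)).toNat (by omega) (i + 1) n rfl (by omega) _ _
        (incB_revDigits i.toNat i rfl hi)
    · rw [show PySem.List.pyRange i n 1 = [] from by
        simp [PySem.List.pyRange]; omega]
      simp

-- ===== VERDICT (by name: the statement is the Claim_ definition above) =====
theorem concepts_spec : Claim_equal_concepts := by
  intro n _
  show concepts n = concepts_alt n
  unfold concepts concepts_alt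
  have h := sim n.toNat 0 n (by omega) le_rfl
    ((PySem.Dict.empty : PySem.Dict Int String),
     (PySem.Dict.empty : PySem.Dict String Int)) []
    (by rw [incB, revDigits, if_pos (by omega)])
  simp only [show (fun (st : PySem.Dict Int String × PySem.Dict String Int) i =>
      let name := String.ofList (lettersAChars i)
      (st.1.insert i name, st.2.insert name i)) = stepA from rfl,
    show (fun (st : (PySem.Dict Int String × PySem.Dict String Int) × List Int) i =>
      let digits := incB st.2
      let name := String.ofList (digits.reverse.map (fun d => Char.ofNat (65 + d.toNat)))
      ((st.1.1.insert i name, st.1.2.insert name i), digits)) = stepB from rfl]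
  rw [h]
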